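-- pv_equiv track=rewrite | github.com/ha-re-ram/AIML-Lab | Experiment-03-8Queens-LocalSearch/hill.py | get_next_board
-- ===== SOURCE A (Python) =====
-- def calculate_cost(board):
--     cost = 0
--     for i in range(len(board)):
--         for j in range(i + 1, len(board)):
--             if board[i] == board[j] or abs(board[i] - board[j]) == abs(i - j):
--                 cost += 1
--     return cost
--
-- def get_next_board(board):
--     next_boards = []
--     current_cost = calculate_cost(board)
--     for i in range(8):
--         for j in range(8):
--             if j != board[i]:
--                 next_board = list(board)
--                 next_board[i] = j
--                 next_boards.append(next_board)
--     next_boards.sort(key=lambda x: calculate_cost(x))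
--     return next_boards[0], calculate_cost(next_boards[0])
-- ===== SOURCE B (Python) =====
-- def calculate_cost(board):
--     cost = 0
--     for i in range(len(board)):
--         for j in range(i + 1, len(board)):
--             if board[i] == board[j] or abs(board[i] - board[j]) == abs(i - j):
--                 cost += 1
--     return cost
--
-- def get_next_board(board):
--     best = None
--     best_cost = 0
--     for i in range(8):
--         for j in range(8):
--             if j != board[i]:
--                 next_board = list(board)
--                 next_board[i] = j
--                 cost = calculate_cost(next_board)
--                 if best is None or cost < best_cost:
--                     best, best_cost = next_board, cost
--     return best, best_cost
-- ===== Notes on version B (the rewrite author's own statement) =====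
-- stated objective: simpler
-- what changed: Replaces building all 56+ neighbor boards, stable-sorting them by cost and taking the first, with a single fused generate-and-scan loop keeping a running best board and best cost (strict <, so the first minimum wins, matching the stable sort).
import Mathlib
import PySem

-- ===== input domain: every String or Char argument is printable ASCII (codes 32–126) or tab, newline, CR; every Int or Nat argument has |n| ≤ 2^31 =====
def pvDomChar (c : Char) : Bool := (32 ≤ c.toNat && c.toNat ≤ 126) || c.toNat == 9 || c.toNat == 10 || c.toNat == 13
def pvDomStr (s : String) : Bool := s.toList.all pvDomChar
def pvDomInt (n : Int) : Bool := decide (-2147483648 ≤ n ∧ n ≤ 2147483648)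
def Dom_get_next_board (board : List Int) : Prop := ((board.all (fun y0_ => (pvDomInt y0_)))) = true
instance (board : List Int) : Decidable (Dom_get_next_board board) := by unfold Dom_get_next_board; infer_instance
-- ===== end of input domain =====

-- B replaces A's "build every neighbor, stable-sort by cost, take the first" with a fused
-- generate-and-scan loop keeping a running best board/cost (strict <, so ties keep the first).


-- ===== PORT A =====
-- calculate_cost, shared verbatim by both Python versions
def calcCost (board : List Int) : Int :=
  (PySem.List.pyRange 0 (PySem.List.len board) 1).foldl (fun cost i =>
    (PySem.List.pyRange (i + 1) (PySem.List.len board) 1).foldl (fun cost j =>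
      if PySem.List.pyGetD board i 0 = PySem.List.pyGetD board j 0 ∨
         (PySem.List.pyGetD board i 0 - PySem.List.pyGetD board j 0).natAbs = (i - j).natAbs
      then cost + 1 else cost) cost) 0

def get_next_board (board : List Int) : List Int × Int :=
  let _current_cost := calcCost board
  let next_boards : List (List Int) :=
    (PySem.List.pyRange 0 8 1).foldl (fun acc i =>
      (PySem.List.pyRange 0 8 1).foldl (fun acc j =>
        if j ≠ PySem.List.pyGetD board i 0
        then acc ++ [PySem.List.pySetD board i j] else acc) acc) []
  match PySem.List.sorted next_boards calcCost false with
  | [] => ([], 0)          -- unreachable: next_boards is never empty (totality guard only)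
  | m :: _ => (m, calcCost m)

-- ===== PORT B =====
def get_next_board_alt (board : List Int) : List Int × Int :=
  let best : Option (List Int × Int) :=
    (PySem.List.pyRange 0 8 1).foldl (fun acc i =>
      (PySem.List.pyRange 0 8 1).foldl (fun acc j =>
        if j ≠ PySem.List.pyGetD board i 0 then
          let nb := PySem.List.pySetD board i j
          let c := calcCost nb
          match acc with
          | none => some (nb, c)
          | some (_, bc) => if c < bc then some (nb, c) else acc
        else acc) acc) none
  match best with
  | none => ([], 0)        -- unreachable: the loop always sees a neighbor (totality guard only)
  | some r => r

-- ===== PRECONDITION & SPEC =====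
-- Pre_ excludes exactly the boards of length < 8, on which Python A raises IndexError at board[i].
def Pre_get_next_board (board : List Int) : Prop := 8 ≤ board.length
instance (board : List Int) : Decidable (Pre_get_next_board board) := by unfold Pre_get_next_board; infer_instance
def pvWitness_get_next_board : List Int := [0, 1, 2, 3, 4, 5, 6, 7]

def Spec_get_next_board (board : List Int) (out : List Int × Int) : Prop := out = get_next_board_alt board
instance (board : List Int) (out : List Int × Int) : Decidable (Spec_get_next_board board out) := by unfold Spec_get_next_board; infer_instance

-- ===== CLAIM (what is proved, stated in full; the proofs are below) =====
def Claim_equal_get_next_board : Prop := ∀ (board : List Int), Dom_get_next_board board → Pre_get_next_board board → Spec_get_next_board board (get_next_board board)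

-- ===== LEMMAS AND PROOFS =====

-- the running-min step on boards, and its paired (board, cost) version used by B
def pvMStep (s : Option (List Int)) (x : List Int) : Option (List Int) :=
  match s with
  | none => some x
  | some m => if calcCost x < calcCost m then some x else some m

def pvPStep (s : Option (List Int × Int)) (x : List Int) : Option (List Int × Int) :=
  match s with
  | none => some (x, calcCost x)
  | some (_, bc) => if calcCost x < bc then some (x, calcCost x) else s

-- one insertion only changes the head as the min-step does
theorem pvHead_insertBy (x : List Int) (acc : List (List Int)) :
    (PySem.List.insertBy (fun a b => decide (calcCost a < calcCost b)) x acc).head? =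
      pvMStep acc.head? x := by
  cases acc with
  | nil => simp [PySem.List.insertBy, pvMStep]
  | cons m t =>
      simp only [PySem.List.insertBy, pvMStep, List.head?_cons]
      by_cases h : calcCost x < calcCost m <;> simp [h]

-- head of the insertion-sort fold = running-min fold
theorem pvHead_sort_fold (xs : List (List Int)) :
    ∀ acc : List (List Int),
      (xs.foldl (fun a x => PySem.List.insertBy (fun a b => decide (calcCost a < calcCost b)) x a) acc).head? =
        xs.foldl pvMStep acc.head? := by
  induction xs with
  | nil => intro acc; rfl
  | cons x t ih => intro acc; simp only [List.foldl_cons, ih, pvHead_insertBy]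

theorem pvHead_sorted (xs : List (List Int)) :
    (PySem.List.sorted xs calcCost false).head? = xs.foldl pvMStep none := by
  rw [PySem.List.sorted_eq_foldl_insertBy]
  simpa using pvHead_sort_fold xs []

-- B's paired scan tracks the min scan
theorem pvPair_fold (xs : List (List Int)) :
    ∀ s : Option (List Int),
      xs.foldl pvPStep (s.map (fun m => (m, calcCost m))) =
        (xs.foldl pvMStep s).map (fun m => (m, calcCost m)) := by
  induction xs with
  | nil => intro s; rfl
  | cons x t ih =>
      intro s
      have hstep : pvPStep (s.map (fun m => (m, calcCost m))) x =
          (pvMStep s x).map (fun m => (m, calcCost m)) := by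
        cases s with
        | none => rfl
        | some m => simp only [Option.map_some, pvPStep, pvMStep]; split <;> simp
      simp only [List.foldl_cons, hstep, ih]

-- fusion: folding a step over an appended-up list = running the step inside the building loop
theorem pvFuse {α σL : Type} (step : σL → List Int → σL) (s0 : σL)
    (bF : List (List Int) → α → List (List Int)) (sF : σL → α → σL)
    (h : ∀ (acc : List (List Int)) (x : α), (bF acc x).foldl step s0 = sF (acc.foldl step s0) x) :
    ∀ (l : List α) (acc : List (List Int)),
      (l.foldl bF acc).foldl step s0 = l.foldl sF (acc.foldl step s0) := by
  intro l
  induction l with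
  | nil => intro acc; rfl
  | cons x t ih => intro acc; simp only [List.foldl_cons, ih, h]

-- the inner j-loop of B is the pvPStep-fold of the inner j-loop of A
theorem pvInner (board : List Int) (i : Int) :
    ∀ (acc : List (List Int)),
      ((PySem.List.pyRange 0 8 1).foldl (fun acc j =>
          if j ≠ PySem.List.pyGetD board i 0
          then acc ++ [PySem.List.pySetD board i j] else acc) acc).foldl pvPStep none =
      (PySem.List.pyRange 0 8 1).foldl (fun s j =>
          if j ≠ PySem.List.pyGetD board i 0
          then pvPStep s (PySem.List.pySetD board i j) else s) (acc.foldl pvPStep none) := by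
  intro acc
  refine pvFuse pvPStep none _ _ (fun acc j => ?_) _ acc
  split
  · rw [List.foldl_append]; rfl
  · rfl

-- B's whole nested fold is the pvPStep-fold of A's neighbor list
theorem pvNested (board : List Int) :
    ((PySem.List.pyRange 0 8 1).foldl (fun acc i =>
        (PySem.List.pyRange 0 8 1).foldl (fun acc j =>
          if j ≠ PySem.List.pyGetD board i 0
          then acc ++ [PySem.List.pySetD board i j] else acc) acc) []).foldl pvPStep none =
    (PySem.List.pyRange 0 8 1).foldl (fun acc i =>
      (PySem.List.pyRange 0 8 1).foldl (fun acc j =>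
        if j ≠ PySem.List.pyGetD board i 0 then
          let nb := PySem.List.pySetD board i j
          let c := calcCost nb
          match acc with
          | none => some (nb, c)
          | some (_, bc) => if c < bc then some (nb, c) else acc
        else acc) acc) none := by
  have := pvFuse (α := Int) pvPStep none
    (fun acc i => (PySem.List.pyRange 0 8 1).foldl (fun acc j =>
        if j ≠ PySem.List.pyGetD board i 0
        then acc ++ [PySem.List.pySetD board i j] else acc) acc)
    (fun s i => (PySem.List.pyRange 0 8 1).foldl (fun s j =>
        if j ≠ PySem.List.pyGetD board i 0
        then pvPStep s (PySem.List.pySetD board i j) else s) s)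
    (fun acc i => pvInner board i acc) (PySem.List.pyRange 0 8 1) []
  simp only [List.foldl_nil] at this
  rw [this]
  apply PySem.List.foldl_congr_mem
  intro s i _
  apply PySem.List.foldl_congr_mem
  intro s' j _
  split
  · cases s' with
    | none => rfl
    | some r => cases r; rfl
  · rfl

-- ===== VERDICT (by name: the statement is the Claim_ definition above) =====
theorem get_next_board_spec : Claim_equal_get_next_board := by
  intro board _ _
  unfold Spec_get_next_board get_next_board get_next_board_alt
  rw [← pvNested board]
  set ns : List (List Int) := (PySem.List.pyRange 0 8 1).foldl (fun acc i =>
      (PySem.List.pyRange 0 8 1).foldl (fun acc j =>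
        if j ≠ PySem.List.pyGetD board i 0
        then acc ++ [PySem.List.pySetD board i j] else acc) acc) [] with hns
  have hpair := pvPair_fold ns none
  simp only [Option.map_none] at hpair
  have hhead := pvHead_sorted ns
  cases hs : PySem.List.sorted ns calcCost false with
  | nil =>
      rw [hs] at hhead
      simp only [List.head?] at hhead
      rw [hpair, ← hhead]
      simp [hs]
  | cons m t =>
      rw [hs] at hhead
      simp only [List.head?] at hhead
      rw [hpair, ← hhead]
      simp [hs]
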